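-- pv_equiv track=rewrite | github.com/hephil/gltfit | src/fit_bsdf.py | unpack_parameters
-- ===== SOURCE A (Python) =====
-- def unpack_parameters(params_vector, layout):
--     params = []
--     idx = 0
--     for size in layout:
--         if size == 1:
--             params.append(params_vector[idx: idx + 1])
--         else:
--             params.append(params_vector[idx: idx + size])
--         idx += size
--     return params
-- ===== SOURCE B (Python) =====
-- def unpack_parameters(params_vector, layout):
--     params = []
--     end = sum(layout)
--     for size in reversed(layout):
--         params.append(params_vector[end - size:end])
--         end -= size
--     params.reverse()
--     return params
-- ===== Notes on version B (the rewrite author's own statement) =====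
-- stated objective: alternative
-- what changed: Traverses the layout in reverse, carrying a suffix end-offset down from sum(layout) and appending segments back-to-front (one final reverse), instead of A's forward pass threading a running start index with its redundant size==1 branch.
import Mathlib
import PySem

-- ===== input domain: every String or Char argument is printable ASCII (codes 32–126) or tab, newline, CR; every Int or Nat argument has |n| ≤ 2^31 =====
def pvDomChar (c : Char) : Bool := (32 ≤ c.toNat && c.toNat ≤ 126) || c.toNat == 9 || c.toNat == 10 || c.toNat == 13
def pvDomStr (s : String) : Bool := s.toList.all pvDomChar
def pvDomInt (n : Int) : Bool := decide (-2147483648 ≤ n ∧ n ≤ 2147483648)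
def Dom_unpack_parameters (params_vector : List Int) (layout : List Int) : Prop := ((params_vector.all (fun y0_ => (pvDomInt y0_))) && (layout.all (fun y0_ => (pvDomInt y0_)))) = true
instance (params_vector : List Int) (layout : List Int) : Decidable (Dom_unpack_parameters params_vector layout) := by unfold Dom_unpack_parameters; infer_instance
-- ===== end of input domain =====

-- B traverses the layout in reverse with a suffix end-offset, building the segments back-to-front (alternative traversal, same cost).

-- ===== PORT A =====
-- forward loop over layout threading (params, idx); Python slices never raise
def unpack_parameters (params_vector : List Int) (layout : List Int) : List (List Int) :=
  (layout.foldl (fun (st : List (List Int) × Int) size =>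
      if size == 1 then
        (st.1 ++ [PySem.List.slice params_vector (some st.2) (some (st.2 + 1))], st.2 + size)
      else
        (st.1 ++ [PySem.List.slice params_vector (some st.2) (some (st.2 + size))], st.2 + size))
    ([], 0)).1

-- ===== PORT B =====
-- end = sum(layout); reversed loop appending params_vector[end-size:end]; final reverse
def unpack_parameters_alt (params_vector : List Int) (layout : List Int) : List (List Int) :=
  let total := layout.foldl (fun a b => a + b) 0
  let st := layout.reverse.foldl (fun (st : List (List Int) × Int) size =>
      (st.1 ++ [PySem.List.slice params_vector (some (st.2 - size)) (some st.2)], st.2 - size))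
    ([], total)
  st.1.reverse

-- ===== PRECONDITION & SPEC =====
def Spec_unpack_parameters (params_vector : List Int) (layout : List Int) (out : List (List Int)) : Prop := out = unpack_parameters_alt params_vector layout
instance (params_vector : List Int) (layout : List Int) (out : List (List Int)) : Decidable (Spec_unpack_parameters params_vector layout out) := by unfold Spec_unpack_parameters; infer_instance

-- ===== CLAIM (what is proved, stated in full; the proofs are below) =====
def Claim_equal_unpack_parameters : Prop := ∀ (params_vector : List Int) (layout : List Int), Dom_unpack_parameters params_vector layout → Spec_unpack_parameters params_vector layout (unpack_parameters params_vector layout)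

-- ===== LEMMAS AND PROOFS =====

-- canonical segment list: slices of params_vector along prefix sums starting at idx
def pvSegs (params_vector : List Int) : Int → List Int → List (List Int)
  | _, [] => []
  | idx, s :: r => PySem.List.slice params_vector (some idx) (some (idx + s)) :: pvSegs params_vector (idx + s) r

-- folding (+) from any start equals the start plus the fold from 0
theorem foldl_add_init (l : List Int) : ∀ a : Int, l.foldl (fun a b => a + b) a = a + l.foldl (fun a b => a + b) 0 := by
  induction l with
  | nil => intro a; simp
  | cons t ts ih => intro a; simp only [List.foldl_cons]; rw [ih (a + t), ih (0 + t)]; ring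

-- A's fold from any accumulator/offset equals the accumulator followed by the canonical segments
theorem a_fold_eq (params_vector : List Int) :
    ∀ (layout : List Int) (acc : List (List Int)) (idx : Int),
      (layout.foldl (fun (st : List (List Int) × Int) size =>
          if size == 1 then
            (st.1 ++ [PySem.List.slice params_vector (some st.2) (some (st.2 + 1))], st.2 + size)
          else
            (st.1 ++ [PySem.List.slice params_vector (some st.2) (some (st.2 + size))], st.2 + size))
        (acc, idx)).1 = acc ++ pvSegs params_vector idx layout := by
  intro layout
  induction layout with
  | nil => intro acc idx; simp [pvSegs]
  | cons s r ih =>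
    intro acc idx
    rw [List.foldl_cons]
    by_cases hs : s = 1
    · subst hs
      simp only [beq_self_eq_true, if_true]
      rw [ih]
      simp [pvSegs]
    · have hb : (s == 1) = false := by simp [hs]
      simp only [hb, Bool.false_eq_true, if_false]
      rw [ih]
      simp [pvSegs]

-- B's reversed fold from end = idx + sum(layout) produces the canonical segments reversed, and comes back to idx
theorem b_fold_eq (params_vector : List Int) :
    ∀ (layout : List Int) (acc : List (List Int)) (idx : Int),
      layout.reverse.foldl (fun (st : List (List Int) × Int) size =>
          (st.1 ++ [PySem.List.slice params_vector (some (st.2 - size)) (some st.2)], st.2 - size))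
        (acc, idx + layout.foldl (fun a b => a + b) 0)
      = (acc ++ (pvSegs params_vector idx layout).reverse, idx) := by
  intro layout
  induction layout with
  | nil => intro acc idx; simp [pvSegs]
  | cons s r ih =>
    intro acc idx
    have hsum : idx + (s :: r).foldl (fun a b => a + b) 0 = (idx + s) + r.foldl (fun a b => a + b) 0 := by
      simp only [List.foldl_cons]
      rw [foldl_add_init r (0 + s)]
      ring
    rw [List.reverse_cons, List.foldl_append, hsum, ih acc (idx + s)]
    simp only [List.foldl_cons, List.foldl_nil, pvSegs, List.reverse_cons]
    have h1 : idx + s - s = idx := by ring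
    rw [h1]
    simp [List.append_assoc]

-- ===== VERDICT (by name: the statement is the Claim_ definition above) =====
theorem unpack_parameters_spec : Claim_equal_unpack_parameters := by
  intro params_vector layout _
  unfold Spec_unpack_parameters unpack_parameters unpack_parameters_alt
  rw [a_fold_eq params_vector layout [] 0]
  have h := b_fold_eq params_vector layout [] 0
  rw [Int.zero_add] at h
  simp [h]
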